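-- pv_equiv track=rewrite | github.com/craigdeng-cpu/interac-sentiment-bot | app.py | _parse_trend_fields
-- ===== SOURCE A (Python) =====
-- def _parse_trend_fields(trend_raw: str) -> tuple[str, str, str]:
--     """Extract Still active / Went quiet / New this scan values from trend section."""
--     still, quiet, new = "", "", ""
--     for line in (trend_raw or "").splitlines():
--         l = line.strip()
--         if l.lower().startswith("- still active:"):
--             still = l.split(":", 1)[1].strip()
--         elif l.lower().startswith("- went quiet:"):
--             quiet = l.split(":", 1)[1].strip()
--         elif l.lower().startswith("- new this scan:"):
--             new = l.split(":", 1)[1].strip()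
--     return still, quiet, new
-- ===== SOURCE B (Python) =====
-- def _parse_trend_fields(trend_raw: str) -> tuple[str, str, str]:
--     """Build a label->value table in one pass, then query the three labels."""
--     table = {}
--     for line in (trend_raw or "").splitlines():
--         l = line.strip()
--         if ":" in l:
--             head, tail = l.split(":", 1)
--             table[head.lower()] = tail.strip()
--     return (table.get("- still active", ""),
--             table.get("- went quiet", ""),
--             table.get("- new this scan", ""))
-- ===== Notes on version B (the rewrite author's own statement) =====
-- stated objective: alternative
-- what changed: B replaces A's per-line if/elif prefix cascade holding three mutable slots by a single pass that builds a dict from each colon-bearing line's lowercased head to its stripped tail, then answers the three labels by dictionary lookup with empty-string defaults.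
import Mathlib
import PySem

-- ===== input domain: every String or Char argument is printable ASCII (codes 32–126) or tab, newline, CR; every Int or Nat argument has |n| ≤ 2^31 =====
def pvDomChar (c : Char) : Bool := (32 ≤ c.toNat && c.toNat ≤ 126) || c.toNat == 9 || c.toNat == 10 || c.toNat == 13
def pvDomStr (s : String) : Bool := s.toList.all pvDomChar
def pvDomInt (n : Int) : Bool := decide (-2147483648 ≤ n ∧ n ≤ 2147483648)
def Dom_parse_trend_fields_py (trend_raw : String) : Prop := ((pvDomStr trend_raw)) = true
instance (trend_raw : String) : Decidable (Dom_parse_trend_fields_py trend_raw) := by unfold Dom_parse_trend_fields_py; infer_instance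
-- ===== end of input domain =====

-- B builds a label→value table in one pass and then queries the three labels; A keeps three slots updated by an if/elif cascade.
-- Equivalence of the RETURN values is proved on all inputs (both are total).

-- ===== PORT A =====
-- one loop iteration of A: the if/elif cascade over the three labelled prefixes.
-- `l.split(":", 1)[1]` is ported as `List.getD … 1 ""`: under the startswith guard the line
-- contains a ':' so index 1 always exists and the "" fallback is never taken.
def pvStepA (st : String × String × String) (line : String) : String × String × String :=
  let l := PySem.Str.strip line
  if PySem.Str.startswith (PySem.Str.lower l) "- still active:" then
    (PySem.Str.strip (((PySem.Str.splitMax? l ":" 1).getD []).getD 1 ""), st.2.1, st.2.2)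
  else if PySem.Str.startswith (PySem.Str.lower l) "- went quiet:" then
    (st.1, PySem.Str.strip (((PySem.Str.splitMax? l ":" 1).getD []).getD 1 ""), st.2.2)
  else if PySem.Str.startswith (PySem.Str.lower l) "- new this scan:" then
    (st.1, st.2.1, PySem.Str.strip (((PySem.Str.splitMax? l ":" 1).getD []).getD 1 ""))
  else st

def parse_trend_fields_py (trend_raw : String) : String × String × String :=
  -- `(trend_raw or "")`: the empty string is the only falsy str
  (PySem.Str.splitlines (if trend_raw = "" then "" else trend_raw)).foldl pvStepA ("", "", "")

-- ===== PORT B =====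
-- one loop iteration of B: if the stripped line contains a ':', store lowercased head ↦ stripped tail.
-- `head, tail = l.split(":", 1)` is ported as `getD 0 ""` / `getD 1 ""`: under the `":" in l`
-- guard the split has exactly two parts, so the fallbacks are never taken.
def pvStepB (d : PySem.Dict String String) (line : String) : PySem.Dict String String :=
  let l := PySem.Str.strip line
  if PySem.Str.isIn ":" l then
    let parts := (PySem.Str.splitMax? l ":" 1).getD []
    d.insert (PySem.Str.lower (parts.getD 0 "")) (PySem.Str.strip (parts.getD 1 ""))
  else d

def parse_trend_fields_py_alt (trend_raw : String) : String × String × String :=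
  let tbl := (PySem.Str.splitlines (if trend_raw = "" then "" else trend_raw)).foldl pvStepB ∅
  (tbl.getD "- still active" "", tbl.getD "- went quiet" "", tbl.getD "- new this scan" "")

-- ===== PRECONDITION & SPEC =====
def Spec_parse_trend_fields_py (trend_raw : String) (out : String × String × String) : Prop := out = parse_trend_fields_py_alt trend_raw
instance (trend_raw : String) (out : String × String × String) : Decidable (Spec_parse_trend_fields_py trend_raw out) := by unfold Spec_parse_trend_fields_py; infer_instance

-- ===== CLAIM (what is proved, stated in full; the proofs are below) =====
def Claim_equal_parse_trend_fields_py : Prop := ∀ (trend_raw : String), Dom_parse_trend_fields_py trend_raw → Spec_parse_trend_fields_py trend_raw (parse_trend_fields_py trend_raw)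

-- ===== LEMMAS AND PROOFS =====

lemma pv_toNat_ofNat (n : Nat) (h : n.isValidChar) : (Char.ofNat n).toNat = n := by
  simp [Char.ofNat, h, Char.toNat, Char.ofNatAux]

-- lowering a character creates or destroys no colon
lemma pv_lowerChar_colon (c : Char) : PySem.Chars.lowerChar c = ':' ↔ c = ':' := by
  constructor
  · intro h
    by_contra hne
    unfold PySem.Chars.lowerChar PySem.Chars.isupper at h
    split_ifs at h with hu
    · simp only [Bool.and_eq_true, decide_eq_true_eq] at hu
      obtain ⟨h1, h2⟩ := hu
      rw [Char.le_def] at h1 h2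
      have h1' : 65 ≤ c.toNat := h1
      have h2' : c.toNat ≤ 90 := h2
      have hv : (c.toNat + 32).isValidChar := Or.inl (by omega)
      have ht : (Char.ofNat (c.toNat + 32)).toNat = c.toNat + 32 := pv_toNat_ofNat _ hv
      rw [h] at ht
      have h58 : (':' : Char).toNat = 58 := by decide
      omega
    · exact hne h
  · intro h; subst h; decide

lemma pv_mem_lower_colon (cs : List Char) : ':' ∈ PySem.Chars.lower cs ↔ ':' ∈ cs := by
  unfold PySem.Chars.lower
  simp [List.mem_map, pv_lowerChar_colon]

lemma pv_takeWhile_lower (cs : List Char) :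
    (PySem.Chars.lower cs).takeWhile (fun c => decide (c ≠ ':'))
      = PySem.Chars.lower (cs.takeWhile (fun c => decide (c ≠ ':'))) := by
  unfold PySem.Chars.lower
  rw [List.takeWhile_map]
  congr 1
  have : ((fun c => decide (c ≠ ':')) ∘ PySem.Chars.lowerChar) = (fun c => decide (c ≠ ':')) := by
    funext c
    simp [Function.comp, pv_lowerChar_colon]
  rw [this]

lemma pv_takeWhile_append (L t : List Char) (hL : ':' ∉ L) :
    (L ++ ':' :: t).takeWhile (fun c => decide (c ≠ ':')) = L := by
  induction L with
  | nil => simp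
  | cons a l ih =>
    have ha : a ≠ ':' := fun h => hL (h ▸ List.mem_cons_self)
    simp only [List.cons_append, List.takeWhile_cons]
    rw [ih (fun h => hL (List.mem_cons_of_mem _ h))]
    simp [ha]

lemma pv_dropWhile_mem (ds : List Char) (h : ':' ∈ ds) :
    ds.dropWhile (fun c => decide (c ≠ ':')) = ':' :: (ds.dropWhile (fun c => decide (c ≠ ':'))).tail := by
  induction ds with
  | nil => cases h
  | cons a l ih =>
    by_cases ha : a = ':'
    · subst ha; simp
    · have h' : ':' ∈ l := by
        rcases List.mem_cons.mp h with h'' | h''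
        · exact absurd h''.symm ha
        · exact h''
      have ha' : (decide (a ≠ ':')) = true := by simp [ha]
      rw [List.dropWhile_cons, ha', if_pos rfl]
      exact ih h'

lemma pv_prefix_colon (L ds : List Char) (hL : ':' ∉ L) :
    (L ++ [':']) <+: ds ↔ (':' ∈ ds ∧ ds.takeWhile (fun c => decide (c ≠ ':')) = L) := by
  constructor
  · rintro ⟨t, ht⟩
    have hds : ds = L ++ ':' :: t := by rw [← ht]; simp
    subst hds
    refine ⟨by simp, pv_takeWhile_append L t hL⟩
  · rintro ⟨hm, htw⟩
    refine ⟨(ds.dropWhile (fun c => decide (c ≠ ':'))).tail, ?_⟩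
    have hsplit := List.takeWhile_append_dropWhile (p := fun c => decide (c ≠ ':')) (l := ds)
    calc (L ++ [':']) ++ (ds.dropWhile (fun c => decide (c ≠ ':'))).tail
        = L ++ (':' :: (ds.dropWhile (fun c => decide (c ≠ ':'))).tail) := by simp
      _ = ds.takeWhile (fun c => decide (c ≠ ':')) ++ ds.dropWhile (fun c => decide (c ≠ ':')) := by
            rw [htw, ← pv_dropWhile_mem ds hm]
      _ = ds := hsplit

-- splitOnMax.go with maxsplit already exhausted returns the rest as one piece
lemma pv_go0 (fuel : Nat) (l cur : List Char) (acc : List (List Char)) :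
    PySem.Chars.splitOnMax.go [':'] fuel 0 l cur acc = ((cur.reverse ++ l) :: acc).reverse := by
  cases fuel with
  | zero => rw [PySem.Chars.splitOnMax.go.eq_def]
  | succ f =>
    cases l with
    | nil => rw [PySem.Chars.splitOnMax.go.eq_def]; simp
    | cons c rest => rw [PySem.Chars.splitOnMax.go.eq_def]; simp

-- splitOnMax.go with maxsplit 1: split at the first colon if any
lemma pv_go1 (cs : List Char) : ∀ (fuel : Nat) (cur : List Char) (acc : List (List Char)),
    cs.length < fuel →
    PySem.Chars.splitOnMax.go [':'] fuel 1 cs cur acc =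
      (if ':' ∈ cs then
        ((cs.dropWhile (fun c => decide (c ≠ ':'))).tail
          :: (cur.reverse ++ cs.takeWhile (fun c => decide (c ≠ ':'))) :: acc)
      else ((cur.reverse ++ cs) :: acc)).reverse := by
  induction cs with
  | nil =>
    intro fuel cur acc hf
    obtain ⟨f, rfl⟩ : ∃ f, fuel = f + 1 := ⟨fuel - 1, by omega⟩
    rw [PySem.Chars.splitOnMax.go.eq_def]
    simp
  | cons c rest ih =>
    intro fuel cur acc hf
    obtain ⟨f, rfl⟩ : ∃ f, fuel = f + 1 := ⟨fuel - 1, by omega⟩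
    rw [PySem.Chars.splitOnMax.go.eq_def]
    by_cases hc : c = ':'
    · subst hc
      have hpre : [':'].isPrefixOf (':' :: rest) = true := by simp [List.isPrefixOf]
      simp only [hpre, if_true, List.length_cons, List.drop_succ_cons]
      norm_num
      rw [pv_go0]
      simp
    · have hpre : [':'].isPrefixOf (c :: rest) = false := by
        simp [List.isPrefixOf]; exact fun h => hc h.symm
      simp only [hpre, if_false, Bool.false_eq_true]
      norm_num
      rw [ih f (c :: cur) acc (by simpa using hf)]
      have hc' : ¬(':' = c) := fun h => hc h.symm
      by_cases hm : ':' ∈ rest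
      · simp [hm, hc, hc', List.takeWhile_cons, List.dropWhile_cons]
      · simp [hm, hc']

lemma pv_split1_mem (cs : List Char) (h : ':' ∈ cs) :
    PySem.Chars.splitOnMax cs [':'] 1 =
      [cs.takeWhile (fun c => decide (c ≠ ':')), (cs.dropWhile (fun c => decide (c ≠ ':'))).tail] := by
  unfold PySem.Chars.splitOnMax
  rw [if_neg (by omega)]
  have h1 : ((1 : Int)).toNat = 1 := rfl
  rw [h1, pv_go1 cs (cs.length + 1) [] [] (by omega)]
  simp [h]

-- A's guard in terms of B's table key
lemma pv_startswith (cs L : List Char) (hL : ':' ∉ L) :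
    PySem.Chars.startswith (PySem.Chars.lower cs) (L ++ [':']) = true ↔
      (':' ∈ cs ∧ PySem.Chars.lower (cs.takeWhile (fun c => decide (c ≠ ':'))) = L) := by
  rw [PySem.Chars.startswith_iff, pv_prefix_colon _ _ hL, pv_mem_lower_colon, pv_takeWhile_lower]

-- the single-step correspondence: A's cascade applied to the three lookups of d
-- equals the three lookups of B's updated table
lemma pv_step (d : PySem.Dict String String) (line : String) :
    pvStepA (d.getD "- still active" "", d.getD "- went quiet" "", d.getD "- new this scan" "") line
      = ((pvStepB d line).getD "- still active" "",
         (pvStepB d line).getD "- went quiet" "",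
         (pvStepB d line).getD "- new this scan" "") := by
  simp only [pvStepA, pvStepB]
  set l := PySem.Str.strip line with hl
  have hin : (PySem.Str.isIn ":" l = true) ↔ ':' ∈ l.toList := by
    show PySem.Chars.isIn [':'] l.toList = true ↔ _
    rw [PySem.Chars.isIn_iff_infix]
    exact List.singleton_infix_iff _ _
  have hlow : (PySem.Str.lower l).toList = PySem.Chars.lower l.toList := by
    simp [PySem.Str.lower]
  have hsw : ∀ (P K : String), P.toList = K.toList ++ [':'] → ':' ∉ K.toList →
      ((PySem.Str.startswith (PySem.Str.lower l) P = true) ↔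
        (':' ∈ l.toList ∧ PySem.Chars.lower (l.toList.takeWhile (fun c => decide (c ≠ ':'))) = K.toList)) := by
    intro P K hP hK
    show PySem.Chars.startswith (PySem.Str.lower l).toList P.toList = true ↔ _
    rw [hlow, hP]
    exact pv_startswith l.toList K.toList hK
  have hsw1 := hsw "- still active:" "- still active" (by decide) (by decide)
  have hsw2 := hsw "- went quiet:" "- went quiet" (by decide) (by decide)
  have hsw3 := hsw "- new this scan:" "- new this scan" (by decide) (by decide)
  have hkey : ∀ K : String,
      (PySem.Str.lower (String.ofList (l.toList.takeWhile (fun c => decide (c ≠ ':')))) = K) ↔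
        (PySem.Chars.lower (l.toList.takeWhile (fun c => decide (c ≠ ':'))) = K.toList) := by
    intro K
    rw [← String.toList_inj]
    simp [PySem.Str.lower]
  by_cases hB : PySem.Str.isIn ":" l = true
  · have hmem : ':' ∈ l.toList := hin.mp hB
    have hsp : PySem.Str.splitMax? l ":" 1 =
        some [String.ofList (l.toList.takeWhile (fun c => decide (c ≠ ':'))),
              String.ofList ((l.toList.dropWhile (fun c => decide (c ≠ ':'))).tail)] := by
      show Option.map _ (PySem.Chars.splitMax? l.toList [':'] 1) = _
      unfold PySem.Chars.splitMax?
      rw [if_neg (by decide)]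
      rw [pv_split1_mem l.toList hmem]
      rfl
    simp only [if_pos hB]
    rw [hsp]
    simp only [Option.getD_some, List.getD_cons_zero, List.getD_cons_succ]
    split_ifs with hA1 hA2 hA3
    · -- "- still active" line
      have hk : PySem.Str.lower (String.ofList (l.toList.takeWhile (fun c => decide (c ≠ ':'))))
          = "- still active" := (hkey _).mpr (hsw1.mp hA1).2
      rw [hk, PySem.Dict.getD_insert, PySem.Dict.getD_insert, PySem.Dict.getD_insert,
        if_pos rfl, if_neg (by decide), if_neg (by decide)]
    · -- "- went quiet" line
      have hk : PySem.Str.lower (String.ofList (l.toList.takeWhile (fun c => decide (c ≠ ':'))))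
          = "- went quiet" := (hkey _).mpr (hsw2.mp hA2).2
      rw [hk, PySem.Dict.getD_insert, PySem.Dict.getD_insert, PySem.Dict.getD_insert,
        if_neg (by decide), if_pos rfl, if_neg (by decide)]
    · -- "- new this scan" line
      have hk : PySem.Str.lower (String.ofList (l.toList.takeWhile (fun c => decide (c ≠ ':'))))
          = "- new this scan" := (hkey _).mpr (hsw3.mp hA3).2
      rw [hk, PySem.Dict.getD_insert, PySem.Dict.getD_insert, PySem.Dict.getD_insert,
        if_neg (by decide), if_neg (by decide), if_pos rfl]
    · -- a colon line with some other label: stored under a key none of the lookups hits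
      have hne : ∀ K : String, PySem.Chars.lower (l.toList.takeWhile (fun c => decide (c ≠ ':'))) ≠ K.toList →
          ¬(K = PySem.Str.lower (String.ofList (l.toList.takeWhile (fun c => decide (c ≠ ':'))))) :=
        fun K hn h => hn ((hkey K).mp h.symm)
      have n1 := hne "- still active" (fun h => hA1 (hsw1.mpr ⟨hmem, h⟩))
      have n2 := hne "- went quiet" (fun h => hA2 (hsw2.mpr ⟨hmem, h⟩))
      have n3 := hne "- new this scan" (fun h => hA3 (hsw3.mpr ⟨hmem, h⟩))
      rw [PySem.Dict.getD_insert, PySem.Dict.getD_insert, PySem.Dict.getD_insert,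
        if_neg n1, if_neg n2, if_neg n3]
  · simp only [if_neg hB]
    split_ifs with hA1 hA2 hA3
    · exact absurd (hin.mpr (hsw1.mp hA1).1) hB
    · exact absurd (hin.mpr (hsw2.mp hA2).1) hB
    · exact absurd (hin.mpr (hsw3.mp hA3).1) hB
    · rfl

-- the loop invariant, by induction over the lines
lemma pv_fold (lines : List String) : ∀ d : PySem.Dict String String,
    lines.foldl pvStepA (d.getD "- still active" "", d.getD "- went quiet" "", d.getD "- new this scan" "")
      = ((lines.foldl pvStepB d).getD "- still active" "",
         (lines.foldl pvStepB d).getD "- went quiet" "",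
         (lines.foldl pvStepB d).getD "- new this scan" "") := by
  induction lines with
  | nil => intro d; rfl
  | cons x xs ih =>
    intro d
    simp only [List.foldl_cons]
    rw [pv_step d x]
    exact ih (pvStepB d x)

-- ===== VERDICT (by name: the statement is the Claim_ definition above) =====
theorem parse_trend_fields_py_spec : Claim_equal_parse_trend_fields_py := by
  intro trend_raw _
  unfold Spec_parse_trend_fields_py parse_trend_fields_py parse_trend_fields_py_alt
  exact pv_fold (PySem.Str.splitlines (if trend_raw = "" then "" else trend_raw)) ∅
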